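-- pv_equiv track=rewrite | github.com/Thoai-HoangLe/CS112.M21.KHCL.N14 | Homework/Brute force/Robot.py | Convert
-- ===== SOURCE A (Python) =====
-- def Convert(s, m, n):
--     x, y = 0, 0
--     for i in range(len(s)):
--         if s[i] == 'L':
--             y -= 1
--         elif s[i] == 'R':
--             y += 1
--         elif s[i] == 'U':
--             x -= 1
--         elif s[i] == 'D':
--             x += 1
--         if m + x <= 0 or n + y <= 0 or x >= m or y >= n:
--             return False
--     return True
-- ===== SOURCE B (Python) =====
-- def _step(c, x, y):
--     if c == 'L':
--         return x, y - 1
--     if c == 'R':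
--         return x, y + 1
--     if c == 'U':
--         return x - 1, y
--     if c == 'D':
--         return x + 1, y
--     return x, y
--
-- def Convert(s, m, n):
--     if not s:
--         return True
--     x, y = _step(s[0], 0, 0)
--     min_x = max_x = x
--     min_y = max_y = y
--     for c in s[1:]:
--         x, y = _step(c, x, y)
--         min_x = min(min_x, x)
--         max_x = max(max_x, x)
--         min_y = min(min_y, y)
--         max_y = max(max_y, y)
--     return min_x > -m and max_x < m and min_y > -n and max_y < n
-- ===== Notes on version B (the rewrite author's own statement) =====
-- stated objective: alternative
-- what changed: B replaces A's per-step early-return bounds check by one pass that accumulates min/max of the x- and y-coordinates reached after each character and does a single four-way comparison at the end (empty string trivially True).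
import Mathlib
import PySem

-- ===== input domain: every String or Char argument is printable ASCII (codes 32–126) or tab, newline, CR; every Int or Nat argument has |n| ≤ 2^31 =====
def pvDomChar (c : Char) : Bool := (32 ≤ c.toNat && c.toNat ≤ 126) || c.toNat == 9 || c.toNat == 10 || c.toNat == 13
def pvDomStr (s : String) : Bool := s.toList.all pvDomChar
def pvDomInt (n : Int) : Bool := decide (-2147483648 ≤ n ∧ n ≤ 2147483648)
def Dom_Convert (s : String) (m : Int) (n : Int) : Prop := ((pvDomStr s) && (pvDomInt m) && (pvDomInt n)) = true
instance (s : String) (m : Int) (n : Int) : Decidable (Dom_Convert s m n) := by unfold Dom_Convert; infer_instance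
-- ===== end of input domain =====

-- B replaces A's per-step early-return bounds check by one pass accumulating min/max of the
-- positions reached after each character, with a single comparison at the end (alternative decomposition).


-- ===== PORT A =====
-- A's loop: update (x,y) by the current character, then return False as soon as the bound
-- check fails; True if the whole string passes.
def convertLoop (l : List Char) (x y m n : Int) : Bool :=
  match l with
  | [] => true
  | c :: rest =>
    let y1 := if c = 'L' then y - 1 else y
    let y2 := if ¬ (c = 'L') ∧ c = 'R' then y1 + 1 else y1
    let x1 := if ¬ (c = 'L') ∧ ¬ (c = 'R') ∧ c = 'U' then x - 1 else x
    let x2 := if ¬ (c = 'L') ∧ ¬ (c = 'R') ∧ ¬ (c = 'U') ∧ c = 'D' then x1 + 1 else x1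
    if m + x2 ≤ 0 ∨ n + y2 ≤ 0 ∨ x2 ≥ m ∨ y2 ≥ n then false
    else convertLoop rest x2 y2 m n

def Convert (s : String) (m : Int) (n : Int) : Bool :=
  convertLoop s.toList 0 0 m n

-- ===== PORT B =====
-- B's step: the new position after one character.
def stepB (c : Char) (x y : Int) : Int × Int :=
  if c = 'L' then (x, y - 1)
  else if c = 'R' then (x, y + 1)
  else if c = 'U' then (x - 1, y)
  else if c = 'D' then (x + 1, y)
  else (x, y)

-- B's loop: accumulate min/max of the coordinates reached after each character.
def altLoop (l : List Char) (x y mnx mxx mny mxy : Int) : Int × Int × Int × Int :=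
  match l with
  | [] => (mnx, mxx, mny, mxy)
  | c :: rest =>
    let p := stepB c x y
    altLoop rest p.1 p.2 (min mnx p.1) (max mxx p.1) (min mny p.2) (max mxy p.2)

def Convert_alt (s : String) (m : Int) (n : Int) : Bool :=
  match s.toList with
  | [] => true
  | c :: rest =>
    let p := stepB c 0 0
    let r := altLoop rest p.1 p.2 p.1 p.1 p.2 p.2
    decide (r.1 > -m) && decide (r.2.1 < m) && decide (r.2.2.1 > -n) && decide (r.2.2.2 < n)

-- ===== PRECONDITION & SPEC =====
def Spec_Convert (s : String) (m : Int) (n : Int) (out : Bool) : Prop := out = Convert_alt s m n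
instance (s : String) (m : Int) (n : Int) (out : Bool) : Decidable (Spec_Convert s m n out) := by unfold Spec_Convert; infer_instance

-- ===== CLAIM (what is proved, stated in full; the proofs are below) =====
def Claim_equal_Convert : Prop := ∀ (s : String) (m : Int) (n : Int), Dom_Convert s m n → Spec_Convert s m n (Convert s m n)

-- ===== LEMMAS AND PROOFS =====

-- the final bounds check of B, on an accumulator
def inb (mnx mxx mny mxy m n : Int) : Bool :=
  decide (mnx > -m) && decide (mxx < m) && decide (mny > -n) && decide (mxy < n)

-- A's branch cascade computes exactly B's step
lemma step_eq (c : Char) (x y : Int) :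
    ((if ¬ (c = 'L') ∧ ¬ (c = 'R') ∧ ¬ (c = 'U') ∧ c = 'D' then
        (if ¬ (c = 'L') ∧ ¬ (c = 'R') ∧ c = 'U' then x - 1 else x) + 1
      else (if ¬ (c = 'L') ∧ ¬ (c = 'R') ∧ c = 'U' then x - 1 else x)),
     (if ¬ (c = 'L') ∧ c = 'R' then (if c = 'L' then y - 1 else y) + 1
      else (if c = 'L' then y - 1 else y))) = stepB c x y := by
  unfold stepB
  by_cases hL : c = 'L' <;> by_cases hR : c = 'R' <;> by_cases hU : c = 'U' <;>
    by_cases hD : c = 'D' <;> simp_all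

-- accumulator invariant: the final check of B on altLoop's result equals the
-- check on the accumulator so far AND-ed with the remainder of A's loop
lemma key (m n : Int) (l : List Char) :
    ∀ x y mnx mxx mny mxy,
      inb (altLoop l x y mnx mxx mny mxy).1 (altLoop l x y mnx mxx mny mxy).2.1
          (altLoop l x y mnx mxx mny mxy).2.2.1 (altLoop l x y mnx mxx mny mxy).2.2.2 m n
        = (inb mnx mxx mny mxy m n && convertLoop l x y m n) := by
  induction l with
  | nil => intro x y mnx mxx mny mxy; simp [altLoop, convertLoop]
  | cons c rest ih =>
    intro x y mnx mxx mny mxy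
    rw [show altLoop (c :: rest) x y mnx mxx mny mxy =
        altLoop rest (stepB c x y).1 (stepB c x y).2
          (min mnx (stepB c x y).1) (max mxx (stepB c x y).1)
          (min mny (stepB c x y).2) (max mxy (stepB c x y).2) from rfl]
    rw [ih]
    rw [show convertLoop (c :: rest) x y m n =
        (if m + (stepB c x y).1 ≤ 0 ∨ n + (stepB c x y).2 ≤ 0 ∨
            (stepB c x y).1 ≥ m ∨ (stepB c x y).2 ≥ n then false
         else convertLoop rest (stepB c x y).1 (stepB c x y).2 m n) from by
      conv_lhs => rw [convertLoop]
      rw [← step_eq c x y]]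
    rcases stepB c x y with ⟨x', y'⟩
    dsimp only
    by_cases h : m + x' ≤ 0 ∨ n + y' ≤ 0 ∨ x' ≥ m ∨ y' ≥ n
    · rw [if_pos h, Bool.and_false]
      have hz : inb (min mnx x') (max mxx x') (min mny y') (max mxy y') m n = false := by
        simp only [inb, Bool.and_eq_false_iff, decide_eq_false_iff_not, not_lt, gt_iff_lt]
        omega
      rw [hz, Bool.false_and]
    · rw [if_neg h]
      simp only [inb]
      rw [decide_eq_decide.mpr (show min mnx x' > -m ↔ mnx > -m by omega),
          decide_eq_decide.mpr (show max mxx x' < m ↔ mxx < m by omega),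
          decide_eq_decide.mpr (show min mny y' > -n ↔ mny > -n by omega),
          decide_eq_decide.mpr (show max mxy y' < n ↔ mxy < n by omega)]

-- ===== VERDICT (by name: the statement is the Claim_ definition above) =====
theorem Convert_spec : Claim_equal_Convert := by
  intro s m n _
  unfold Spec_Convert Convert Convert_alt
  cases hl : s.toList with
  | nil => simp [convertLoop]
  | cons c rest =>
    rw [show convertLoop (c :: rest) 0 0 m n =
        (if m + (stepB c 0 0).1 ≤ 0 ∨ n + (stepB c 0 0).2 ≤ 0 ∨
            (stepB c 0 0).1 ≥ m ∨ (stepB c 0 0).2 ≥ n then false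
         else convertLoop rest (stepB c 0 0).1 (stepB c 0 0).2 m n) from by
      conv_lhs => rw [convertLoop]
      rw [← step_eq c 0 0]]
    have hk := key m n rest (stepB c 0 0).1 (stepB c 0 0).2
      (stepB c 0 0).1 (stepB c 0 0).1 (stepB c 0 0).2 (stepB c 0 0).2
    simp only []
    rw [show (decide ((altLoop rest (stepB c 0 0).1 (stepB c 0 0).2 (stepB c 0 0).1
          (stepB c 0 0).1 (stepB c 0 0).2 (stepB c 0 0).2).1 > -m) &&
        decide ((altLoop rest (stepB c 0 0).1 (stepB c 0 0).2 (stepB c 0 0).1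
          (stepB c 0 0).1 (stepB c 0 0).2 (stepB c 0 0).2).2.1 < m) &&
        decide ((altLoop rest (stepB c 0 0).1 (stepB c 0 0).2 (stepB c 0 0).1
          (stepB c 0 0).1 (stepB c 0 0).2 (stepB c 0 0).2).2.2.1 > -n) &&
        decide ((altLoop rest (stepB c 0 0).1 (stepB c 0 0).2 (stepB c 0 0).1
          (stepB c 0 0).1 (stepB c 0 0).2 (stepB c 0 0).2).2.2.2 < n)) =
        (inb (stepB c 0 0).1 (stepB c 0 0).1 (stepB c 0 0).2 (stepB c 0 0).2 m n &&
          convertLoop rest (stepB c 0 0).1 (stepB c 0 0).2 m n) from hk]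
    rcases stepB c 0 0 with ⟨x', y'⟩
    dsimp only
    by_cases h : m + x' ≤ 0 ∨ n + y' ≤ 0 ∨ x' ≥ m ∨ y' ≥ n
    · rw [if_pos h]
      simp only [inb, gt_iff_lt]
      have hfalse : (decide (-m < x') && decide (x' < m) && decide (-n < y') &&
          decide (y' < n)) = false := by
        simp only [Bool.and_eq_false_iff, decide_eq_false_iff_not, not_lt]
        omega
      rw [hfalse, Bool.false_and]
    · rw [if_neg h]
      simp only [inb, gt_iff_lt]
      have htrue : (decide (-m < x') && decide (x' < m) && decide (-n < y') &&
          decide (y' < n)) = true := by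
        simp only [Bool.and_eq_true, decide_eq_true_eq]
        omega
      rw [htrue, Bool.true_and]
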